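-- pv_equiv track=rewrite | github.com/eroge-69/PyToExe | python-files/eciesse.py | compute_nibs
-- ===== SOURCE A (Python) =====
-- from typing import List, Optional, Tuple
--
-- HI_WEIGHTS = [1<<14, 1<<12, 1<<10, 1<<8]   # 16384,4096,1024,256
--
-- LO_WEIGHTS = [1<<6, 1<<4, 1<<2, 1<<0]      # 64,16,4,1
--
-- def compute_nibs(value_cents:int) -> Tuple[List[int], List[int], List[int]]:
--     rem = value_cents
--     hi_digits = []
--     for w in HI_WEIGHTS:
--         d = rem // w
--         hi_digits.append(int(d))
--         rem = rem % w
--     rem2 = rem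
--     lo_digits = []
--     for w in LO_WEIGHTS:
--         d = rem2 // w
--         lo_digits.append(int(d))
--         rem2 = rem2 % w
--     nibs = [(hi_digits[i] << 2) | lo_digits[i] for i in range(4)]
--     return hi_digits, lo_digits, nibs
-- ===== SOURCE B (Python) =====
-- def compute_nibs(value_cents):
--     # Bottom-up: seven divmods by 4 yield the low digits LSB-first; the
--     # leftover quotient is the (unbounded) top digit.
--     rem = value_cents
--     digits = []
--     for _ in range(7):
--         rem, r = divmod(rem, 4)
--         digits.append(r)
--     digits.append(rem)
--     digits.reverse()
--     hi_digits = digits[:4]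
--     lo_digits = digits[4:]
--     nibs = [(h << 2) | l for h, l in zip(hi_digits, lo_digits)]
--     return hi_digits, lo_digits, nibs
-- ===== Notes on version B (the rewrite author's own statement) =====
-- stated objective: alternative
-- what changed: B extracts the eight base-four digits bottom-up by seven repeated divmods by four (the leftover quotient being the unbounded top digit) and then slices and zips them, instead of A's two top-down loops dividing by fixed precomputed weights.
import Mathlib
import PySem

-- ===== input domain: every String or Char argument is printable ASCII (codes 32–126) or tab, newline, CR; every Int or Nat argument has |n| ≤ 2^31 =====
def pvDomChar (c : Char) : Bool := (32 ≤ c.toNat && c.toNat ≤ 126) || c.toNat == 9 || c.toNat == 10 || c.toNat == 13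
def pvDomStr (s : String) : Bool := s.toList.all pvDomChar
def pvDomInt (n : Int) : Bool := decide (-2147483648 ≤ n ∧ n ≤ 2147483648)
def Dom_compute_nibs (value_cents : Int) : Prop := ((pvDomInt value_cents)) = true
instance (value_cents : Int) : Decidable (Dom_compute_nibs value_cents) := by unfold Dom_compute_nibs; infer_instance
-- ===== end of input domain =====

-- B extracts the base-4 digits bottom-up by repeated divmod-by-4 (leftover quotient =
-- unbounded top digit) instead of A's top-down division by fixed weights; alternative
-- decomposition, same cost.

-- ===== PORT A =====
-- 'for w in HI_WEIGHTS/LO_WEIGHTS: d = rem // w; append; rem = rem % w' ported as a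
-- foldl over the weight list with state (rem, digits); hi_digits[i]/lo_digits[i] are
-- always in range (lists have length 4), so getD i 0 is exact.
def compute_nibs (value_cents : Int) : List Int × List Int × List Int :=
  let step := fun (st : Int × List Int) (w : Int) =>
    (PySem.Int.mod st.1 w, st.2 ++ [PySem.Int.floordiv st.1 w])
  let s1 := ([16384, 4096, 1024, 256] : List Int).foldl step (value_cents, [])
  let hi_digits := s1.2
  let s2 := ([64, 16, 4, 1] : List Int).foldl step (s1.1, [])
  let lo_digits := s2.2
  let nibs := (PySem.List.pyRange 0 4 1).map (fun i =>
    PySem.Int.bor ((hi_digits.getD i.toNat 0) <<< (2 : Nat)) (lo_digits.getD i.toNat 0))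
  (hi_digits, lo_digits, nibs)

-- ===== PORT B =====
-- 'for _ in range(7): rem, r = divmod(rem, 4); digits.append(r)' ported as a foldl over
-- range(7) with state (rem, digits); digits[:4]/digits[4:] are take/drop (length is 8).
def compute_nibs_alt (value_cents : Int) : List Int × List Int × List Int :=
  let st := (List.range 7).foldl (fun (st : Int × List Int) _ =>
    (PySem.Int.floordiv st.1 4, st.2 ++ [PySem.Int.mod st.1 4])) (value_cents, [])
  let digits := (st.2 ++ [st.1]).reverse
  let hi_digits := digits.take 4
  let lo_digits := digits.drop 4
  let nibs := (hi_digits.zip lo_digits).map (fun (p : Int × Int) =>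
    PySem.Int.bor (p.1 <<< (2 : Nat)) p.2)
  (hi_digits, lo_digits, nibs)

-- ===== PRECONDITION & SPEC =====
def Spec_compute_nibs (value_cents : Int) (out : List Int × List Int × List Int) : Prop := out = compute_nibs_alt value_cents
instance (value_cents : Int) (out : List Int × List Int × List Int) : Decidable (Spec_compute_nibs value_cents out) := by unfold Spec_compute_nibs; infer_instance

-- ===== CLAIM (what is proved, stated in full; the proofs are below) =====
def Claim_equal_compute_nibs : Prop := ∀ (value_cents : Int), Dom_compute_nibs value_cents → Spec_compute_nibs value_cents (compute_nibs value_cents)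

-- ===== LEMMAS AND PROOFS =====
-- A = B for EVERY integer (Dom is not needed): unfold both ports to the eight concrete
-- digit expressions (simp turns floordiv/mod into ediv/emod), close each digit identity
-- with omega, and the nib equations by congruence of bor/<<< plus omega.
set_option maxHeartbeats 1000000 in
theorem compute_nibs_eq (x : Int) : compute_nibs x = compute_nibs_alt x := by
  simp only [compute_nibs, compute_nibs_alt]
  simp [PySem.List.pyRange, List.range_succ]
  refine ⟨⟨?_,?_,?_,?_⟩,⟨?_,?_,?_⟩,?_,?_,?_,?_⟩ <;> first | omega | (congr 2 <;> omega)

-- ===== VERDICT (by name: the statement is the Claim_ definition above) =====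
theorem compute_nibs_spec : Claim_equal_compute_nibs := by
  intro x _
  exact compute_nibs_eq x
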